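-- pv_equiv track=rewrite | github.com/Artemis21/FriendSpotter | src/main/analysis.py | strplist
-- ===== SOURCE A (Python) =====
-- def strplist(lst):
--     fromstart = []
--     started = False
--     for itm in lst:
--         if started:
--             fromstart.append(itm)
--         elif itm:
--             started = True
--             fromstart.append(itm)
--     return fromstart
-- ===== SOURCE B (Python) =====
-- def strplist(lst):
--     items = list(lst)
--     idx = next((i for i, x in enumerate(items) if x), len(items))
--     return items[idx:]
-- ===== Notes on version B (the rewrite author's own statement) =====
-- stated objective: simpler
-- what changed: Replaces the stateful 'started'-flag accumulator loop with locating the index of the first truthy element and returning a single slice from there.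
import Mathlib
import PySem

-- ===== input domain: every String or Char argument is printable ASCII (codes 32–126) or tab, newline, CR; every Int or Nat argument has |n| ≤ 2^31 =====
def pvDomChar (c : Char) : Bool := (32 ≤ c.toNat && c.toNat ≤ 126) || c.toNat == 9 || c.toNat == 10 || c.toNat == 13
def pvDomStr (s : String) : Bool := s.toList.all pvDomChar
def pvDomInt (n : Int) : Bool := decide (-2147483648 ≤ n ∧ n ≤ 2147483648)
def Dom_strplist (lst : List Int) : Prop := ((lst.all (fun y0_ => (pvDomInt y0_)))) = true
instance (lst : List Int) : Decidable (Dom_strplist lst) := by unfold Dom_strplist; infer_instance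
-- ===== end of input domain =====

-- B replaces A's 'started'-flag accumulator loop with find-first-truthy-index then one slice (simpler decomposition, same O(n)).

-- ===== PORT A =====
-- fold state is (started, fromstart), exactly A's loop
def strplist (lst : List Int) : List Int :=
  (lst.foldl (fun (s : Bool × List Int) itm =>
      if s.1 then (s.1, s.2 ++ [itm])
      else if itm ≠ 0 then (true, s.2 ++ [itm])
      else s) (false, [])).2

-- ===== PORT B =====
-- idx = index of first truthy element (length if none), as B's enumerate/next search
def strplistAltIdx (items : List Int) (i : Nat) : Nat :=
  match items with
  | [] => i
  | x :: rest => if x ≠ 0 then i else strplistAltIdx rest (i + 1)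

def strplist_alt (lst : List Int) : List Int :=
  let items := lst
  let idx := strplistAltIdx items 0
  items.drop idx

-- ===== PRECONDITION & SPEC =====
def Spec_strplist (lst : List Int) (out : List Int) : Prop := out = strplist_alt lst
instance (lst : List Int) (out : List Int) : Decidable (Spec_strplist lst out) := by unfold Spec_strplist; infer_instance

-- ===== CLAIM (what is proved, stated in full; the proofs are below) =====
def Claim_equal_strplist : Prop := ∀ (lst : List Int), Dom_strplist lst → Spec_strplist lst (strplist lst)

-- ===== LEMMAS AND PROOFS =====
-- once started, A's loop appends every remaining element
theorem strplist_started (lst : List Int) (acc : List Int) :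
    (lst.foldl (fun (s : Bool × List Int) itm =>
      if s.1 then (s.1, s.2 ++ [itm])
      else if itm ≠ 0 then (true, s.2 ++ [itm])
      else s) (true, acc)).2 = acc ++ lst := by
  induction lst generalizing acc with
  | nil => simp
  | cons h t ih =>
    rw [List.foldl_cons]
    show (List.foldl _ (true, acc ++ [h]) t).2 = acc ++ h :: t
    rw [ih]; simp

-- B's index search offset: shifting the start index shifts the result
theorem strplistAltIdx_shift (items : List Int) (i : Nat) :
    strplistAltIdx items i = strplistAltIdx items 0 + i := by
  induction items generalizing i with
  | nil => simp [strplistAltIdx]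
  | cons h t ih =>
    simp only [strplistAltIdx]
    split
    · simp
    · rw [ih (i + 1), ih 1]; omega

theorem strplist_eq_alt (lst : List Int) : strplist lst = strplist_alt lst := by
  induction lst with
  | nil => rfl
  | cons h t ih =>
    by_cases hz : h = 0
    · subst hz
      simp only [strplist, strplist_alt, List.foldl, strplistAltIdx] at *
      rw [strplistAltIdx_shift t 1]
      simpa using ih
    · have hA : strplist (h :: t) = h :: t := by
        simp only [strplist, List.foldl_cons, Bool.false_eq_true, if_false, ne_eq, hz,
          not_false_iff, if_true, List.nil_append]
        simpa using strplist_started t [h]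
      have hB : strplist_alt (h :: t) = h :: t := by
        simp [strplist_alt, strplistAltIdx, hz]
      rw [hA, hB]

-- ===== VERDICT (by name: the statement is the Claim_ definition above) =====
theorem strplist_spec : Claim_equal_strplist := by
  intro lst _
  unfold Spec_strplist
  exact strplist_eq_alt lst
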